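-- pv_equiv track=rewrite | github.com/rdrf2838/Algorithms | competitive_programming/meta_hacker_cup/2022/round_1/b1/main.py | findSquareSum
-- ===== SOURCE A (Python) =====
-- def findSquareSum(Coordinates, N):
--     xq , yq = 0, 0
--     xs , ys = 0, 0
--
--     # Stores final answer
--     res = 0
--
--     # Traverse the array
--     for i in range(N):
--
--         a = Coordinates[i][0]
--         b = Coordinates[i][1]
--
--         res += xq
--         res -= 2 * xs * a
--
--         # Adding the effect of this
--         # point for all the previous
--         # x - points
--         res += i * (a * a)
--
--         # Temporarily add the
--         # square of x-coordinate
--         xq += a * a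
--         xs += a
--         res += yq
--         res -= 2 * ys * b
--         res += i * b * b
--
--         # Add the effect of this point
--         # for all the previous y - points
--         yq += b * b
--         ys += b
--
--     # Print the desired answer
--     return res
-- ===== SOURCE B (Python) =====
-- def findSquareSum(Coordinates, N):
--     res = 0
--     for i in range(N):
--         for j in range(i):
--             dx = Coordinates[i][0] - Coordinates[j][0]
--             dy = Coordinates[i][1] - Coordinates[j][1]
--             res += dx * dx + dy * dy
--     return res
-- ===== Notes on version B (the rewrite author's own statement) =====
-- stated objective: simpler
-- what changed: Replaced the running-sums accumulator trick (maintaining sums and sums of squares of coordinates) by the direct nested loop over unordered pairs i>j accumulating squared distances.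
import Mathlib
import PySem

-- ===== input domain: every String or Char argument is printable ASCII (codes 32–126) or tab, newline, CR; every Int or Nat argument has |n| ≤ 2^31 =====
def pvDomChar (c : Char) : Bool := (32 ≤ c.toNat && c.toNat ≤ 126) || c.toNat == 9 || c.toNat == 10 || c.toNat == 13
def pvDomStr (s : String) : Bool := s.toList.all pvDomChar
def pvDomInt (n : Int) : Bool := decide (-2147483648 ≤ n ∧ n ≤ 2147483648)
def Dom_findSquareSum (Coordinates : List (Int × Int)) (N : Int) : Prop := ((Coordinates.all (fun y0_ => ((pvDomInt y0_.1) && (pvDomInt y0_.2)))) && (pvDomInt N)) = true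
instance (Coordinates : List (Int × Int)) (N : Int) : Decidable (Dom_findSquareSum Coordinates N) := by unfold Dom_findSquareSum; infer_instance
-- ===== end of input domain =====

-- B replaces A's running-sums accumulator trick by the direct nested loop over
-- unordered pairs (simpler to read; O(n^2) instead of A's O(n)).

-- ===== PORT A =====
-- Coordinates[i] is ported as pyGetD with a dummy default: Pre_ guarantees 0 ≤ i < len,
-- where pyGetD coincides with Python indexing (outside Pre_ Python raises IndexError).
def findSquareSum (Coordinates : List (Int × Int)) (N : Int) : Int :=
  let s := (PySem.List.pyRange 0 N 1).foldl
    (fun (st : Int × Int × Int × Int × Int) i =>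
      let xq := st.1; let xs := st.2.1; let ys := st.2.2.1
      let yq := st.2.2.2.1; let res := st.2.2.2.2
      let a := (PySem.List.pyGetD Coordinates i (0, 0)).1
      let b := (PySem.List.pyGetD Coordinates i (0, 0)).2
      -- res += xq; res -= 2*xs*a; res += i*(a*a); xq += a*a; xs += a;
      -- res += yq; res -= 2*ys*b; res += i*b*b; yq += b*b; ys += b
      (xq + a * a, xs + a, ys + b, yq + b * b,
       res + xq - 2 * xs * a + i * (a * a) + yq - 2 * ys * b + i * b * b))
    (0, 0, 0, 0, 0)
  s.2.2.2.2

-- ===== PORT B =====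
def findSquareSum_alt (Coordinates : List (Int × Int)) (N : Int) : Int :=
  (PySem.List.pyRange 0 N 1).foldl
    (fun res i =>
      (PySem.List.pyRange 0 i 1).foldl
        (fun r j =>
          let dx := (PySem.List.pyGetD Coordinates i (0, 0)).1
                    - (PySem.List.pyGetD Coordinates j (0, 0)).1
          let dy := (PySem.List.pyGetD Coordinates i (0, 0)).2
                    - (PySem.List.pyGetD Coordinates j (0, 0)).2
          r + dx * dx + dy * dy)
        res)
    0

-- ===== PRECONDITION & SPEC =====
-- A indexes Coordinates[i] for i in range(N): it raises IndexError when N > len(Coordinates).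
def Pre_findSquareSum (Coordinates : List (Int × Int)) (N : Int) : Prop :=
  N ≤ (Coordinates.length : Int)
instance (Coordinates : List (Int × Int)) (N : Int) : Decidable (Pre_findSquareSum Coordinates N) := by
  unfold Pre_findSquareSum; infer_instance

def pvWitness_findSquareSum : (List (Int × Int)) × Int := ([(1, 2), (3, -1), (0, 4)], 3)

def Spec_findSquareSum (Coordinates : List (Int × Int)) (N : Int) (out : Int) : Prop :=
  out = findSquareSum_alt Coordinates N
instance (Coordinates : List (Int × Int)) (N : Int) (out : Int) : Decidable (Spec_findSquareSum Coordinates N out) := by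
  unfold Spec_findSquareSum; infer_instance

-- ===== CLAIM (what is proved, stated in full; the proofs are below) =====
def Claim_equal_findSquareSum : Prop := ∀ (Coordinates : List (Int × Int)) (N : Int), Dom_findSquareSum Coordinates N → Pre_findSquareSum Coordinates N → Spec_findSquareSum Coordinates N (findSquareSum Coordinates N)

-- ===== LEMMAS AND PROOFS =====

-- g C i = Coordinates[i] (with default), and the running prefix sums A maintains.
def pvG (C : List (Int × Int)) (i : Int) : Int × Int := PySem.List.pyGetD C i (0, 0)

def pvSX (C : List (Int × Int)) : Nat → Int
  | 0 => 0
  | n + 1 => pvSX C n + (pvG C n).1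

def pvQX (C : List (Int × Int)) : Nat → Int
  | 0 => 0
  | n + 1 => pvQX C n + (pvG C n).1 * (pvG C n).1

def pvSY (C : List (Int × Int)) : Nat → Int
  | 0 => 0
  | n + 1 => pvSY C n + (pvG C n).2

def pvQY (C : List (Int × Int)) : Nat → Int
  | 0 => 0
  | n + 1 => pvQY C n + (pvG C n).2 * (pvG C n).2

-- the result after n iterations of A's loop
def pvR (C : List (Int × Int)) : Nat → Int
  | 0 => 0
  | n + 1 =>
    pvR C n + pvQX C n - 2 * pvSX C n * (pvG C n).1 + n * ((pvG C n).1 * (pvG C n).1)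
      + pvQY C n - 2 * pvSY C n * (pvG C n).2 + n * ((pvG C n).2 * (pvG C n).2)

-- A's fold over range(n) computes the five running values
theorem pvA_fold (C : List (Int × Int)) (n : Nat) :
    (PySem.List.pyRange 0 (n : Int) 1).foldl
      (fun (st : Int × Int × Int × Int × Int) i =>
        let xq := st.1; let xs := st.2.1; let ys := st.2.2.1
        let yq := st.2.2.2.1; let res := st.2.2.2.2
        let a := (PySem.List.pyGetD C i (0, 0)).1
        let b := (PySem.List.pyGetD C i (0, 0)).2
        (xq + a * a, xs + a, ys + b, yq + b * b,
         res + xq - 2 * xs * a + i * (a * a) + yq - 2 * ys * b + i * b * b))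
      (0, 0, 0, 0, 0)
      = (pvQX C n, pvSX C n, pvSY C n, pvQY C n, pvR C n) := by
  induction n with
  | zero => simp [pvQX, pvSX, pvSY, pvQY, pvR]
  | succ n ih =>
    rw [show ((n + 1 : Nat) : Int) = (n : Int) + 1 by push_cast; ring,
        PySem.List.pyRange_one_succ_right (by positivity),
        List.foldl_append, ih]
    simp only [List.foldl_cons, List.foldl_nil, pvQX, pvSX, pvSY, pvQY, pvR, pvG,
      PySem.List.pyGetD]
    simp only [Prod.mk.injEq]
    exact ⟨trivial, trivial, trivial, trivial, by ring⟩

-- B's inner loop over range(n) adds the expanded sum of squared distances to the point p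
theorem pvB_inner (C : List (Int × Int)) (p : Int × Int) (n : Nat) (acc : Int) :
    (PySem.List.pyRange 0 (n : Int) 1).foldl
      (fun r j =>
        let dx := p.1 - (PySem.List.pyGetD C j (0, 0)).1
        let dy := p.2 - (PySem.List.pyGetD C j (0, 0)).2
        r + dx * dx + dy * dy)
      acc
      = acc + (n : Int) * (p.1 * p.1) - 2 * p.1 * pvSX C n + pvQX C n
            + (n : Int) * (p.2 * p.2) - 2 * p.2 * pvSY C n + pvQY C n := by
  induction n generalizing acc with
  | zero => simp [pvQX, pvSX, pvSY, pvQY]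
  | succ n ih =>
    rw [show ((n + 1 : Nat) : Int) = (n : Int) + 1 by push_cast; ring,
        PySem.List.pyRange_one_succ_right (by positivity),
        List.foldl_append, ih]
    simp only [List.foldl_cons, List.foldl_nil, pvQX, pvSX, pvSY, pvQY, pvG]
    ring

-- B's outer loop over range(n) computes pvR C n
theorem pvB_fold (C : List (Int × Int)) (n : Nat) :
    (PySem.List.pyRange 0 (n : Int) 1).foldl
      (fun res i =>
        (PySem.List.pyRange 0 i 1).foldl
          (fun r j =>
            let dx := (PySem.List.pyGetD C i (0, 0)).1
                      - (PySem.List.pyGetD C j (0, 0)).1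
            let dy := (PySem.List.pyGetD C i (0, 0)).2
                      - (PySem.List.pyGetD C j (0, 0)).2
            r + dx * dx + dy * dy)
          res)
      0
      = pvR C n := by
  induction n with
  | zero => simp [pvR]
  | succ n ih =>
    rw [show ((n + 1 : Nat) : Int) = (n : Int) + 1 by push_cast; ring,
        PySem.List.pyRange_one_succ_right (by positivity),
        List.foldl_append, ih]
    simp only [List.foldl_cons, List.foldl_nil]
    rw [pvB_inner C (PySem.List.pyGetD C (n : Int) (0, 0)) n (pvR C n)]
    simp only [pvR, pvG]
    ring

-- ===== VERDICT (by name: the statement is the Claim_ definition above) =====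
theorem findSquareSum_spec : Claim_equal_findSquareSum := by
  intro C N _ _
  unfold Spec_findSquareSum findSquareSum findSquareSum_alt
  by_cases h : 0 ≤ N
  · have hN : ((N.toNat : Nat) : Int) = N := Int.toNat_of_nonneg h
    rw [← hN, pvA_fold C N.toNat, pvB_fold C N.toNat]
  · rw [PySem.List.pyRange_one_eq_nil (by omega)]
    simp
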